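-- pv_equiv track=rewrite | github.com/veruyandi/laughing-python | baum_sweet_sequence.py | get_baum_sweet_binary
-- ===== SOURCE A (Python) =====
-- def get_baum_sweet_binary(number):
--   #True if there is only consecutive zeros of even numbers
--   is_count_even = True
--
--   if number == 1:
--     return 1
--   else:
--     dividend = number
--     quotient = 1
--     while quotient > 0:
--
--         #if quot > 1 : get next binary digit(remainder) by dividing 2, begin from the ones, go through tens, hundreds etc.
--         #if quotient == 1:
--             #then count is even till the last 2 digits, so the result depends on the two last digits which are rem & quot
--             #return quotient and remainder  ## 11 returns 1 | 10 returns 0 since "0" is a seq of zero of odd count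
--         #else:
--         quotient, remainder = divmod(dividend, 2)
--         #if next is 1, a zero block end occurs, so check if no odd count
--         if remainder == 1:
--             if not is_count_even:
--                 return 0
--             elif quotient == 0: #came to last digit
--                 return 1
--             #else: Then no_odd_count and not the last digit, so continue with next digit
--         else: #rem = 0
--             is_count_even = not is_count_even
--
--         dividend = quotient # continue dividing by 2 for next iteration
-- ===== SOURCE B (Python) =====
-- def get_baum_sweet_binary(number):
--   if number <= 0:
--     return None
--   runs = bin(number)[2:].split('1')
--   return 0 if any(len(r) % 2 == 1 for r in runs) else 1
-- ===== Notes on version B (the rewrite author's own statement) =====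
-- stated objective: idiomatic
-- what changed: A scans the bits LSB-first with divmod and a parity toggle inside a while loop; B builds the binary string once, splits it on '1' into the maximal zero-runs and answers 0 iff some run has odd length.
-- outside the precondition, e.g. on get_baum_sweet_binary(0): A returns None, B returns None; on get_baum_sweet_binary(-3): A returns None, B returns None
import Mathlib
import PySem

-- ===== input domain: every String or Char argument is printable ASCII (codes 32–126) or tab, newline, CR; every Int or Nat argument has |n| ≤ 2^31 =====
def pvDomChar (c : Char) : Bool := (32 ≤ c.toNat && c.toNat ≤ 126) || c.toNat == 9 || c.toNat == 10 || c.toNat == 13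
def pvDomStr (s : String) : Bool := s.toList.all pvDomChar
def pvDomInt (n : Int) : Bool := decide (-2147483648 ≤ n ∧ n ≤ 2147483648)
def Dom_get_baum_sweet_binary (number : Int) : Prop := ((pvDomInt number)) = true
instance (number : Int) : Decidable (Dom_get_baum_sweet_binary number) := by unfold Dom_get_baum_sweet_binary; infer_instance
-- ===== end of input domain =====

-- B replaces A's LSB-first divmod scan with a split of the binary string into maximal
-- zero-runs, checking each run's length parity directly (idiomatic, same cost).


-- ===== PORT A =====
-- A's while loop; when the loop falls off the end Python returns None (only for
-- number ≤ 0, outside Pre_), rendered here as 0.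
def bsLoop (dividend : Int) (is_count_even : Bool) (quotient : Int) : Int :=
  if 0 < quotient then
    let q := PySem.Int.floordiv dividend 2
    let r := PySem.Int.mod dividend 2
    if r = 1 then
      if !is_count_even then 0
      else if q = 0 then 1
      else bsLoop q is_count_even q
    else bsLoop q (!is_count_even) q
  else 0
termination_by dividend.natAbs + (if 0 < quotient then 1 else 0)
decreasing_by
  all_goals
    simp only [PySem.Int.floordiv_eq_ediv_of_pos (by norm_num : (0:Int) < 2)]
    split <;> simp_all <;> omega

def get_baum_sweet_binary (number : Int) : Int :=
  if number = 1 then 1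
  else bsLoop number true 1

-- ===== PORT B =====
-- bin(number)[2:] as the MSB-first list of binary digits (exact for number ≥ 1)
def bsBits (n : Nat) : List Nat :=
  if n = 0 then [] else bsBits (n / 2) ++ [n % 2]
termination_by n
decreasing_by omega

-- str.split('1') on the digit list: the maximal (possibly empty) zero-runs — exact
def bsSplit : List Nat → List (List Nat)
  | [] => [[]]
  | b :: rest =>
    if b = 1 then [] :: bsSplit rest
    else match bsSplit rest with
         | r :: rs => (b :: r) :: rs
         | [] => [[b]]

-- B returns None for number ≤ 0 (not an Int; outside Pre_); 0 stands in here.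
def get_baum_sweet_binary_alt (number : Int) : Int :=
  if number ≤ 0 then 0
  else if (bsSplit (bsBits number.toNat)).any (fun r => r.length % 2 == 1) then 0 else 1

-- ===== PRECONDITION & SPEC =====
-- Pre_ excludes number ≤ 0, where Python A (and B) return None, which is not an int.
def Pre_get_baum_sweet_binary (number : Int) : Prop := 1 ≤ number
instance (number : Int) : Decidable (Pre_get_baum_sweet_binary number) := by
  unfold Pre_get_baum_sweet_binary; infer_instance
def pvWitness_get_baum_sweet_binary : Int := 6

def Spec_get_baum_sweet_binary (number : Int) (out : Int) : Prop := out = get_baum_sweet_binary_alt number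
instance (number : Int) (out : Int) : Decidable (Spec_get_baum_sweet_binary number out) := by unfold Spec_get_baum_sweet_binary; infer_instance

-- ===== CLAIM (what is proved, stated in full; the proofs are below) =====
def Claim_equal_get_baum_sweet_binary : Prop := ∀ (number : Int), Dom_get_baum_sweet_binary number → Pre_get_baum_sweet_binary number → Spec_get_baum_sweet_binary number (get_baum_sweet_binary number)

-- ===== LEMMAS AND PROOFS =====

-- common specification: bsH d ice scans d's bits LSB-first, ice = "current zero-run even"
def bsH (d : Nat) (ice : Bool) : Int :=
  if d ≤ 1 then (if ice then 1 else 0)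
  else if d % 2 = 1 then (if ice then bsH (d / 2) true else 0)
  else bsH (d / 2) (!ice)
termination_by d
decreasing_by all_goals omega

theorem bsLoop_eq_bsH (n : Nat) : ∀ (ice : Bool) (q : Int), 1 ≤ n → 0 < q →
    bsLoop (n : Int) ice q = bsH n ice := by
  induction n using Nat.strong_induction_on with
  | _ n IH =>
    intro ice q hn hq
    have hfd : PySem.Int.floordiv (n : Int) 2 = ((n / 2 : Nat) : Int) := by
      rw [PySem.Int.floordiv_eq_ediv_of_pos (by norm_num : (0:Int) < 2)]; omega
    have hmd : PySem.Int.mod (n : Int) 2 = ((n % 2 : Nat) : Int) := by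
      rw [PySem.Int.mod_eq_emod_of_pos (by norm_num : (0:Int) < 2)]; omega
    rw [bsLoop]
    simp only [hq, if_pos, hfd, hmd]
    by_cases h1 : n = 1
    · subst h1; rw [bsH]; cases ice <;> simp
    · have hn2 : 2 ≤ n := by omega
      have hq2 : 1 ≤ n / 2 := by omega
      rw [bsH, if_neg (by omega : ¬ n ≤ 1)]
      by_cases hodd : n % 2 = 1
      · cases ice with
        | false => simp [hodd]
        | true =>
          have hIH := IH (n / 2) (by omega) true ((n / 2 : Nat) : Int) hq2 (by exact_mod_cast hq2)
          rw [show ((n / 2 : Nat) : Int) = (n : Int) / 2 by omega] at hIH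
          simp [hodd, show ¬ ((n : Int) / 2) = 0 by omega, hIH]
      · have heven : n % 2 = 0 := by omega
        have hIH := IH (n / 2) (by omega) (!ice) ((n / 2 : Nat) : Int) hq2 (by exact_mod_cast hq2)
        rw [show ((n / 2 : Nat) : Int) = (n : Int) / 2 by omega] at hIH
        simp [heven, hIH]

theorem bsSplit_ne_nil (l : List Nat) : bsSplit l ≠ [] := by
  induction l with
  | nil => simp [bsSplit]
  | cons b rest ih =>
    rw [bsSplit]
    split
    · simp
    · cases h : bsSplit rest with
      | nil => simp
      | cons r rs => simp

theorem bsSplit_append_one (l : List Nat) : bsSplit (l ++ [1]) = bsSplit l ++ [[]] := by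
  induction l with
  | nil => simp [bsSplit]
  | cons b rest ih =>
    rw [List.cons_append, bsSplit, bsSplit]
    split
    · simp [ih]
    · rw [ih]
      cases h : bsSplit rest with
      | nil => exact absurd h (bsSplit_ne_nil rest)
      | cons r rs => simp

-- split(l ++ [0]) appends 0 to the last run
def bsAppLast : List (List Nat) → List (List Nat)
  | [] => [[0]]
  | [r] => [r ++ [0]]
  | r :: s :: rs => r :: bsAppLast (s :: rs)

theorem bsSplit_append_zero (l : List Nat) :
    bsSplit (l ++ [0]) = bsAppLast (bsSplit l) := by
  induction l with
  | nil => simp [bsSplit, bsAppLast]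
  | cons b rest ih =>
    rw [List.cons_append, bsSplit, bsSplit]
    split
    · rw [ih]
      cases h : bsSplit rest with
      | nil => exact absurd h (bsSplit_ne_nil rest)
      | cons r rs => cases rs <;> simp [bsAppLast]
    · rw [ih]
      cases h : bsSplit rest with
      | nil => exact absurd h (bsSplit_ne_nil rest)
      | cons r rs => cases rs <;> simp [bsAppLast]

theorem bsAppLast_ne_nil (S : List (List Nat)) : bsAppLast S ≠ [] := by
  match S with
  | [] => simp [bsAppLast]
  | [r] => simp [bsAppLast]
  | r :: s :: rs => simp [bsAppLast]

theorem bsAppLast_dropLast (S : List (List Nat)) :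
    (bsAppLast S).dropLast = S.dropLast := by
  match S with
  | [] => simp [bsAppLast]
  | [r] => simp [bsAppLast]
  | r :: s :: rs =>
    rw [bsAppLast]
    rw [List.dropLast_cons_of_ne_nil (bsAppLast_ne_nil (s :: rs)),
        List.dropLast_cons_of_ne_nil (by simp)]
    rw [bsAppLast_dropLast (s :: rs)]

theorem bsAppLast_getLast (S : List (List Nat)) :
    (bsAppLast S).getLastD [] = S.getLastD [] ++ [0] := by
  match S with
  | [] => simp [bsAppLast]
  | [r] => simp [bsAppLast]
  | r :: s :: rs =>
    rw [bsAppLast, List.getLastD_cons, List.getLastD_cons]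
    have ih := bsAppLast_getLast (s :: rs)
    simp only [List.getLastD_eq_getLast?,
      List.getLast?_eq_some_getLast (bsAppLast_ne_nil (s :: rs)),
      List.getLast?_eq_some_getLast (show (s :: rs : List (List Nat)) ≠ [] by simp),
      Option.getD_some] at ih ⊢
    exact ih

def bsOdd (r : List Nat) : Bool := r.length % 2 == 1

theorem bsAny_split (S : List (List Nat)) (hS : S ≠ []) :
    S.any bsOdd = (S.dropLast.any bsOdd || bsOdd (S.getLastD [])) := by
  conv_lhs => rw [← List.dropLast_concat_getLast hS]
  rw [List.any_append]
  simp [List.getLastD_eq_getLast?, List.getLast?_eq_some_getLast hS]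

theorem bsH_eq_runs (n : Nat) : ∀ (ice : Bool), 1 ≤ n →
    bsH n ice =
      if ((bsSplit (bsBits n)).dropLast.any bsOdd ||
          ((((bsSplit (bsBits n)).getLastD []).length + (if ice then 0 else 1)) % 2 == 1))
      then 0 else 1 := by
  induction n using Nat.strong_induction_on with
  | _ n IH =>
    intro ice hn
    by_cases h1 : n = 1
    · subst h1
      rw [bsH]
      have hb : bsBits 1 = [1] := by simp [bsBits]
      rw [hb]
      cases ice <;> simp [bsSplit, bsOdd]
    · have hn2 : 2 ≤ n := by omega
      have hq2 : 1 ≤ n / 2 := by omega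
      have hb : bsBits n = bsBits (n / 2) ++ [n % 2] := by
        rw [bsBits]; simp [show ¬ n = 0 by omega]
      rw [bsH, if_neg (by omega : ¬ n ≤ 1), hb]
      by_cases hodd : n % 2 = 1
      · rw [hodd, bsSplit_append_one, List.dropLast_concat, List.getLastD_concat]
        cases ice with
        | false => simp
        | true =>
          rw [IH (n / 2) (by omega) true hq2,
              bsAny_split _ (bsSplit_ne_nil (bsBits (n / 2)))]
          simp [bsOdd]
      · have heven : n % 2 = 0 := by omega
        rw [heven, bsSplit_append_zero, bsAppLast_dropLast, bsAppLast_getLast]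
        rw [IH (n / 2) (by omega) (!ice) hq2]
        have hC : ∀ L : Nat,
            ((L + (if (!ice) then 0 else 1)) % 2 == 1) =
            (((L + 1) + (if ice then 0 else 1)) % 2 == 1) := by
          intro L; cases ice <;> simp <;> omega
        simp only [List.length_append, List.length_cons, List.length_nil, Nat.zero_add]
        rw [hC ((bsSplit (bsBits (n / 2))).getLastD []).length]
        simp

-- ===== VERDICT (by name: the statement is the Claim_ definition above) =====
theorem get_baum_sweet_binary_spec : Claim_equal_get_baum_sweet_binary := by
  intro number _ hpre
  have hpre' : (1 : Int) ≤ number := hpre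
  by_cases h1 : number = 1
  · subst h1
    unfold Spec_get_baum_sweet_binary get_baum_sweet_binary get_baum_sweet_binary_alt
    rw [if_pos rfl, if_neg (by norm_num : ¬ (1:Int) ≤ 0), show ((1:Int).toNat) = 1 from rfl]
    have hb : bsBits 1 = [1] := by simp [bsBits]
    rw [hb]
    simp [bsSplit]
  · unfold Spec_get_baum_sweet_binary get_baum_sweet_binary get_baum_sweet_binary_alt
    have hn1 : 1 ≤ number.toNat := by omega
    rw [if_neg h1, if_neg (by omega : ¬ number ≤ 0)]
    have hx : bsLoop number true 1 = bsH number.toNat true := by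
      have hnn : number = ((number.toNat : Nat) : Int) := by omega
      rw [hnn]
      simp only [Int.toNat_natCast]
      exact bsLoop_eq_bsH number.toNat true 1 hn1 (by norm_num)
    rw [hx, bsH_eq_runs number.toNat true hn1]
    have hany := bsAny_split (bsSplit (bsBits number.toNat)) (bsSplit_ne_nil (bsBits number.toNat))
    rw [show (fun r : List Nat => r.length % 2 == 1) = bsOdd from rfl, hany]
    simp [bsOdd]
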